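-- pv_equiv track=rewrite | github.com/jiji-svg/coding_test | level0/day2/count_chickens.py | solution
-- ===== SOURCE A (Python) =====
-- def solution(chicken):
--     service_chickens = chicken // 10
--     remain_coupons = chicken % 10
--
--     want_more = (service_chickens + remain_coupons)
--     if want_more >= 10:
--         service_chickens += solution(want_more)
--     else:
--         return service_chickens
--     answer = service_chickens
--     return answer
-- ===== SOURCE B (Python) =====
-- def solution(chicken):
--     total = 0
--     coupons = chicken
--     while True:
--         service = coupons // 10
--         remain = coupons % 10
--         total += service
--         want = service + remain
--         if want >= 10:
--             coupons = want
--         else: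
--             return total
-- ===== Notes on version B (the rewrite author's own statement) =====
-- stated objective: alternative
-- what changed: Replaced A's non-tail recursion (each level adds its service count after the recursive call returns) with an iterative loop carrying an explicit running total accumulator.
import Mathlib
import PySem

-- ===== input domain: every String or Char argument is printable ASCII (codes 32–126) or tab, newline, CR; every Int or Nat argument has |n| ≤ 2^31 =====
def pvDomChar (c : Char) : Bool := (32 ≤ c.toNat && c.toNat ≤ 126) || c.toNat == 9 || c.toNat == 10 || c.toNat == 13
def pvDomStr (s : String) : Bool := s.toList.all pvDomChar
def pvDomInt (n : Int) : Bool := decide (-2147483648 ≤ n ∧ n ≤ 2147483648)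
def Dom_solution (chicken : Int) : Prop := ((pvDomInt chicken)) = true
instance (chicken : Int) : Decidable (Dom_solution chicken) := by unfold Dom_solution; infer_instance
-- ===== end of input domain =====

-- B replaces A's non-tail recursion with an iterative accumulator loop; same values on every Int.

-- termination helper for both ports: when want = s + r ≥ 10, the next argument shrinks
theorem pv_want_lt (chicken : Int)
    (h : 10 ≤ PySem.Int.floordiv chicken 10 + PySem.Int.mod chicken 10) :
    (PySem.Int.floordiv chicken 10 + PySem.Int.mod chicken 10).toNat < chicken.toNat := by
  have hid := PySem.Int.floordiv_mul_add_mod chicken 10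
  have hm := PySem.Int.mod_eq_emod_of_pos (a := chicken) (b := 10) (by norm_num)
  have hb : 0 ≤ chicken % 10 ∧ chicken % 10 < 10 :=
    ⟨Int.emod_nonneg _ (by norm_num), Int.emod_lt_of_pos _ (by norm_num)⟩
  omega

-- ===== PORT A =====
def solution (chicken : Int) : Int :=
  let service_chickens := PySem.Int.floordiv chicken 10
  let remain_coupons := PySem.Int.mod chicken 10
  let want_more := service_chickens + remain_coupons
  if h : want_more ≥ 10 then service_chickens + solution want_more
  else service_chickens
termination_by chicken.toNat
decreasing_by exact pv_want_lt chicken h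

-- ===== PORT B =====
def solution_alt_loop (coupons total : Int) : Int :=
  let service := PySem.Int.floordiv coupons 10
  let remain := PySem.Int.mod coupons 10
  let total' := total + service
  let want := service + remain
  if h : want ≥ 10 then solution_alt_loop want total'
  else total'
termination_by coupons.toNat
decreasing_by exact pv_want_lt coupons h

def solution_alt (chicken : Int) : Int := solution_alt_loop chicken 0

-- ===== PRECONDITION & SPEC =====
def Spec_solution (chicken : Int) (out : Int) : Prop := out = solution_alt chicken
instance (chicken : Int) (out : Int) : Decidable (Spec_solution chicken out) := by unfold Spec_solution; infer_instance

-- ===== CLAIM (what is proved, stated in full; the proofs are below) =====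
def Claim_equal_solution : Prop := ∀ (chicken : Int), Dom_solution chicken → Spec_solution chicken (solution chicken)

-- ===== LEMMAS AND PROOFS =====

theorem loop_eq_total_add (coupons total : Int) :
    solution_alt_loop coupons total = total + solution coupons := by
  induction coupons, total using solution_alt_loop.induct with
  | case1 c t s r t' w h ih =>
    have h' : PySem.Int.floordiv c 10 + PySem.Int.mod c 10 ≥ 10 := h
    have ih' : solution_alt_loop (PySem.Int.floordiv c 10 + PySem.Int.mod c 10)
        (t + PySem.Int.floordiv c 10)
        = (t + PySem.Int.floordiv c 10)
          + solution (PySem.Int.floordiv c 10 + PySem.Int.mod c 10) := ih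
    rw [solution_alt_loop, solution, dif_pos h', dif_pos h', ih']
    ring
  | case2 c t s r w h =>
    have h' : ¬ PySem.Int.floordiv c 10 + PySem.Int.mod c 10 ≥ 10 := h
    rw [solution_alt_loop, solution, dif_neg h', dif_neg h']

-- ===== VERDICT (by name: the statement is the Claim_ definition above) =====
theorem solution_spec : Claim_equal_solution := by
  intro chicken _
  unfold Spec_solution solution_alt
  rw [loop_eq_total_add]
  ring
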